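-- pv_equiv track=rewrite | github.com/COG-UK/phylo-reports | UK_full_report/utils/basic_descriptions.py | get_preliminary_info
-- ===== SOURCE A (Python) =====
-- def get_preliminary_info(intro_countries):
--
-- 	singletons_count = 0
-- 	smalls_count = 0
-- 	for k,v in intro_countries.items():
-- 		if len(v) == 1:
-- 			singletons_count += 1
-- 		if len(v) <=5 :
-- 			smalls_count += 1
--
-- 	return singletons_count, smalls_count
-- ===== SOURCE B (Python) =====
-- def get_preliminary_info(intro_countries):
--     # Build a histogram of value lengths once, then read both answers off it.
--     lens = [len(v) for v in intro_countries.values()]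
--     counts = {}
--     for n in lens:
--         counts[n] = counts.get(n, 0) + 1
--     singletons_count = counts.get(1, 0)
--     smalls_count = sum(counts.get(i, 0) for i in range(0, 6))
--     return singletons_count, smalls_count
-- ===== Notes on version B (the rewrite author's own statement) =====
-- stated objective: alternative
-- what changed: Replaces A's two running tallies updated per entry by a length-histogram dict built in one pass, from which the singleton count is read off at length one and the smalls count is summed over lengths zero to five in a fixed-range second pass.
import Mathlib
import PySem

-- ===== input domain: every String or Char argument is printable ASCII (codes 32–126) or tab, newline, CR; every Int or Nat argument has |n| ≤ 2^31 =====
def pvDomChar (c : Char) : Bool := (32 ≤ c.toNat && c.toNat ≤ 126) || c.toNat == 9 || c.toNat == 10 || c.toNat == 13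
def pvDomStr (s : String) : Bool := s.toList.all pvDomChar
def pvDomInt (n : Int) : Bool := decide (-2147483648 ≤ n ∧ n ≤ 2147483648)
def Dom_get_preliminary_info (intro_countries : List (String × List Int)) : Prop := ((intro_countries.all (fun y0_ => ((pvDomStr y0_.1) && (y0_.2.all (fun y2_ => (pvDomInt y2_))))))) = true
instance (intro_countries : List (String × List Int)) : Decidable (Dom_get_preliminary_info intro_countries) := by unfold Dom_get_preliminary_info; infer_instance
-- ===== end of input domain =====

-- B builds a length-histogram (dict) in one pass and reads both counts off it; alternative decomposition, same O(n) cost.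


-- ===== PORT A =====
-- two running tallies over the dict's items, as in A
def get_preliminary_info (intro_countries : List (String × List Int)) : Int × Int :=
  let st := intro_countries.foldl
    (fun (s : Int × Int) kv =>
      let s1 := if kv.2.length == 1 then s.1 + 1 else s.1
      let s2 := if kv.2.length ≤ 5 then s.2 + 1 else s.2
      (s1, s2))
    (0, 0)
  (st.1, st.2)

-- ===== PORT B =====
-- length histogram built once, both answers read off it
def get_preliminary_info_alt (intro_countries : List (String × List Int)) : Int × Int :=
  let lens : List Int := intro_countries.map (fun kv => (kv.2.length : Int))
  let counts : PySem.Dict Int Int :=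
    lens.foldl (fun d n => d.insert n (d.getD n 0 + 1)) PySem.Dict.empty
  let singletons_count := counts.getD 1 0
  let smalls_count := (PySem.List.pyRange 0 6 1).foldl (fun acc i => acc + counts.getD i 0) 0
  (singletons_count, smalls_count)

-- ===== PRECONDITION & SPEC =====
def Spec_get_preliminary_info (intro_countries : List (String × List Int)) (out : Int × Int) : Prop := out = get_preliminary_info_alt intro_countries
instance (intro_countries : List (String × List Int)) (out : Int × Int) : Decidable (Spec_get_preliminary_info intro_countries out) := by unfold Spec_get_preliminary_info; infer_instance

-- ===== CLAIM (what is proved, stated in full; the proofs are below) =====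
def Claim_equal_get_preliminary_info : Prop := ∀ (intro_countries : List (String × List Int)), Dom_get_preliminary_info intro_countries → Spec_get_preliminary_info intro_countries (get_preliminary_info intro_countries)

-- ===== LEMMAS AND PROOFS =====

-- A's fold adds the two counts to any starting accumulator
theorem foldA_eq (l : List (String × List Int)) (s : Int × Int) :
    l.foldl (fun (s : Int × Int) kv =>
      let s1 := if kv.2.length == 1 then s.1 + 1 else s.1
      let s2 := if kv.2.length ≤ 5 then s.2 + 1 else s.2
      (s1, s2)) s
    = (s.1 + (l.countP (fun kv => kv.2.length == 1) : Int),
       s.2 + (l.countP (fun kv => decide (kv.2.length ≤ 5)) : Int)) := by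
  induction l generalizing s with
  | nil => simp
  | cons x xs ih =>
    rw [List.foldl_cons, ih, List.countP_cons, List.countP_cons]
    simp only [beq_iff_eq, decide_eq_true_eq, Prod.mk.injEq]
    constructor <;> split_ifs <;> push_cast <;> omega

-- the histogram's entry at i is the count of entries of length i
theorem counts_getD (l : List (String × List Int)) (i : Int) :
    ((l.map (fun kv => (kv.2.length : Int))).foldl
      (fun (d : PySem.Dict Int Int) n => d.insert n (d.getD n 0 + 1)) PySem.Dict.empty).getD i 0
    = (l.countP (fun kv => (kv.2.length : Int) == i) : Int) := by
  rw [PySem.Dict.getD_foldl_insert_add_one, PySem.Dict.getD_empty]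
  simp [List.count_eq_countP, List.countP_map, Function.comp_def]

-- the six histogram cells 0..5 add up to the ≤5 count
theorem sum6 (l : List (String × List Int)) :
    (l.countP (fun kv => (kv.2.length : Int) == 0) : Int)
      + (l.countP (fun kv => (kv.2.length : Int) == 1) : Int)
      + (l.countP (fun kv => (kv.2.length : Int) == 2) : Int)
      + (l.countP (fun kv => (kv.2.length : Int) == 3) : Int)
      + (l.countP (fun kv => (kv.2.length : Int) == 4) : Int)
      + (l.countP (fun kv => (kv.2.length : Int) == 5) : Int)
    = (l.countP (fun kv => decide (kv.2.length ≤ 5)) : Int) := by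
  induction l with
  | nil => simp
  | cons x xs ih =>
    simp only [List.countP_cons]
    push_cast
    simp only [beq_iff_eq, decide_eq_true_eq] at *
    split_ifs <;> omega

-- ===== VERDICT (by name: the statement is the Claim_ definition above) =====
theorem get_preliminary_info_spec : Claim_equal_get_preliminary_info := by
  intro l _
  show get_preliminary_info l = get_preliminary_info_alt l
  unfold get_preliminary_info get_preliminary_info_alt
  simp only [foldA_eq, counts_getD]
  have hr : PySem.List.pyRange 0 6 1 = [0, 1, 2, 3, 4, 5] := by decide
  rw [hr]
  simp only [List.foldl_cons, List.foldl_nil]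
  have hp : (l.countP (fun kv => kv.2.length == 1))
      = (l.countP (fun kv => (kv.2.length : Int) == 1)) :=
    List.countP_congr (fun x _ => by simp only [beq_iff_eq]; omega)
  refine Prod.ext ?_ ?_
  · simp [hp]
  · simpa using (sum6 l).symm
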